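-- pv_equiv track=rewrite | github.com/turingcompl33t/advent-of-code | day6/bobby_part1.py | group_sum
-- ===== SOURCE A (Python) =====
-- def line_sum(line):
--     return len(set(line))
--
-- def group_sum(line_list):
--     line_list.extend("\n")
--     count = 0
--     group = []
--     for line in line_list:
--         line = line.rstrip("\n")
--         if line == "":
--             count += line_sum(group)
--             group = []
--         else:
--             group.extend(list(line))
--
--     return count
-- ===== SOURCE B (Python) =====
-- def group_sum(line_list):
--     line_list.extend("\n")
--     lines = [l.rstrip("\n") for l in line_list]
--     total = 0
--     i = 0
--     n = len(lines)
--     while i < n: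
--         if lines[i] == "":
--             i += 1
--             continue
--         j = i
--         while j < n and lines[j] != "":
--             j += 1
--         total += len(set("".join(lines[i:j])))
--         i = j
--     return total
-- ===== Notes on version B (the rewrite author's own statement) =====
-- stated objective: alternative
-- what changed: Replaces A's single-pass accumulate-into-a-group-and-flush-on-blank loop with a partition-into-runs scan: strip all lines first, then an index loop finds each maximal nonblank run and adds the distinct-character count of its joined text.
import Mathlib
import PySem

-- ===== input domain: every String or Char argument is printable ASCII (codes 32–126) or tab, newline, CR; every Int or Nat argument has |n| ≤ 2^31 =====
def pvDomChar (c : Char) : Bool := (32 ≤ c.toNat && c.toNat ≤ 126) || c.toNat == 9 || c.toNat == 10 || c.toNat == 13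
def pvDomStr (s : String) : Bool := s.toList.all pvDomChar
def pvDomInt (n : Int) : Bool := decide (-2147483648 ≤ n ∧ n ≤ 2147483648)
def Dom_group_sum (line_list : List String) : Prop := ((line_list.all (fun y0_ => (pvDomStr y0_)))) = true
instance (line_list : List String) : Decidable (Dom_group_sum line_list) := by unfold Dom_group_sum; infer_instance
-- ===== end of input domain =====

-- B replaces A's accumulate-and-flush-on-blank loop with a partition-into-maximal-runs scan (alternative decomposition, same cost).
-- Both Pythons mutate the argument identically (line_list.extend("\n")); the equivalence proved is about the return value.

-- ===== PORT A =====
-- hand port of s.rstrip("\n") (not in PySem): drop trailing '\n' chars; exact on all strings.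
-- Result kept as List Char (the ports only compare it to "" and take its chars).
def pvRstripNl (s : String) : List Char :=
  (s.toList.reverse.dropWhile (fun c => c = '\n')).reverse

-- helper line_sum(line) = len(set(line)); A calls it on the accumulated group (a list of chars)
def line_sum (line : List Char) : Int := ((PySem.Set.ofList line).length : Int)

-- the for-loop of A, state (count, group)
def aLoop (count : Int) (group : List Char) : List String → Int
  | [] => count
  | line :: rest =>
    let l := pvRstripNl line
    if l = [] then aLoop (count + line_sum group) [] rest
    else aLoop count (group ++ l) rest

def group_sum (line_list : List String) : Int :=
  aLoop 0 [] (line_list ++ ["\n"])   -- line_list.extend("\n") appends the single string "\n"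

-- ===== PORT B =====
-- the outer while loop of B: skip a blank line, or consume one maximal nonblank run
-- (the inner `while j` scan is the takeWhile/dropWhile split) and count its distinct chars
def bRuns : List (List Char) → Int
  | [] => 0
  | l :: rest =>
    if l = [] then bRuns rest
    else ((PySem.Set.ofList (l ++ (rest.takeWhile (fun x => x ≠ [])).flatMap id)).length : Int)
         + bRuns (rest.dropWhile (fun x => x ≠ []))
termination_by xs => xs.length
decreasing_by
  · simp
  · have := List.length_dropWhile_le (fun x : List Char => decide (x ≠ [])) rest
    simp only [List.length_cons]; omega

def group_sum_alt (line_list : List String) : Int :=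
  bRuns ((line_list ++ ["\n"]).map pvRstripNl)

-- ===== PRECONDITION & SPEC =====
def Spec_group_sum (line_list : List String) (out : Int) : Prop := out = group_sum_alt line_list
instance (line_list : List String) (out : Int) : Decidable (Spec_group_sum line_list out) := by unfold Spec_group_sum; infer_instance

-- ===== CLAIM (what is proved, stated in full; the proofs are below) =====
def Claim_equal_group_sum : Prop := ∀ (line_list : List String), Dom_group_sum line_list → Spec_group_sum line_list (group_sum line_list)

-- ===== LEMMAS AND PROOFS =====

theorem takeWhile_append_nil (r : List (List Char)) :
    (r ++ [([] : List Char)]).takeWhile (fun x => x ≠ []) = r.takeWhile (fun x => x ≠ []) := by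
  induction r with
  | nil => simp
  | cons a r ih =>
    by_cases ha : a = []
    · simp [ha]
    · simpa [ha] using ih

theorem dropWhile_append_nil (r : List (List Char)) :
    (r ++ [([] : List Char)]).dropWhile (fun x => x ≠ []) = r.dropWhile (fun x => x ≠ []) ++ [[]] := by
  induction r with
  | nil => simp
  | cons a r ih =>
    by_cases ha : a = []
    · simp [ha]
    · simpa [ha] using ih

theorem bRuns_append_nil (ys : List (List Char)) : bRuns (ys ++ [[]]) = bRuns ys := by
  induction ys using bRuns.induct with
  | case1 => simp [bRuns]
  | case2 rest ih => simpa [bRuns] using ih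
  | case3 l rest hl ih =>
    rw [List.cons_append, bRuns, bRuns, if_neg hl, if_neg hl,
        takeWhile_append_nil, dropWhile_append_nil, ih]

theorem bRuns_split (ys : List (List Char)) :
    bRuns ys = ((PySem.Set.ofList ((ys.takeWhile (fun x => x ≠ [])).flatMap id)).length : Int)
               + bRuns (ys.dropWhile (fun x => x ≠ [])) := by
  cases ys with
  | nil => simp [bRuns]
  | cons l rest =>
    by_cases hl : l = []
    · subst hl
      simp [bRuns]
    · rw [bRuns, if_neg hl, List.takeWhile_cons, List.dropWhile_cons]
      simp [hl]

theorem aLoop_eq (xs : List String) : ∀ (c : Int) (g : List Char),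
    aLoop c g (xs ++ ["\n"]) =
      c + line_sum (g ++ ((xs.map pvRstripNl).takeWhile (fun x => x ≠ [])).flatMap id)
        + bRuns ((xs.map pvRstripNl).dropWhile (fun x => x ≠ [])) := by
  induction xs with
  | nil =>
    intro c g
    have h : pvRstripNl "\n" = [] := by decide
    simp [aLoop, h, bRuns]
  | cons x xs ih =>
    intro c g
    by_cases hx : pvRstripNl x = []
    · rw [List.cons_append, aLoop, if_pos hx, ih, List.map_cons, hx,
          List.takeWhile_cons, List.dropWhile_cons]
      simp only [ne_eq, not_true_eq_false, decide_false, Bool.false_eq_true, if_false]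
      rw [bRuns, bRuns_split (xs.map pvRstripNl)]
      simp [line_sum]
      omega
    · rw [List.cons_append, aLoop, if_neg hx, ih, List.map_cons,
          List.takeWhile_cons, List.dropWhile_cons]
      simp only [hx, ne_eq, not_false_eq_true, decide_true, if_true]
      simp [List.append_assoc]

-- ===== VERDICT (by name: the statement is the Claim_ definition above) =====
theorem group_sum_spec : Claim_equal_group_sum := by
  intro line_list _
  unfold Spec_group_sum group_sum group_sum_alt
  have hmap : (line_list ++ ["\n"]).map pvRstripNl = line_list.map pvRstripNl ++ [[]] := by
    simp [List.map_append]
    decide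
  rw [aLoop_eq, hmap, bRuns_append_nil, bRuns_split (line_list.map pvRstripNl)]
  simp [line_sum]
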